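-- pv_equiv track=rewrite | github.com/shubhivashistha08-ai/blank-app | app.py | extract_flavor_mentions
-- ===== SOURCE A (Python) =====
-- def extract_flavor_mentions(text, flavors):
--     """Extract flavor keywords from text"""
--     if not isinstance(text, str):
--         return None
--     text_lower = text.lower()
--     found_flavors = []
--     for flavor in flavors:
--         if flavor.lower() in text_lower:
--             found_flavors.append(flavor)
--     return found_flavors if found_flavors else None
-- ===== SOURCE B (Python) =====
-- def extract_flavor_mentions(text, flavors):
--     """Extract flavor keywords from text.
--
--     Builds a hash set of every substring of the lowered text whose length is
--     one of the (distinct) lowered-flavor lengths, then answers each flavor by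
--     one set lookup instead of one substring scan per flavor.
--     """
--     if not isinstance(text, str):
--         return None
--     tl = text.lower()
--     pats = [f.lower() for f in flavors]
--     subs = set()
--     for l in set(len(p) for p in pats):
--         for i in range(len(tl) - l + 1):
--             subs.add(tl[i:i + l])
--     res = [f for f, p in zip(flavors, pats) if p in subs]
--     return res if res else None
-- ===== Notes on version B (the rewrite author's own statement) =====
-- stated objective: faster
-- what changed: Instead of one substring scan over the whole text per flavor, B builds one hash set of all lowered-text substrings whose length is a distinct lowered-flavor length and answers each flavor with a single set lookup.
import Mathlib
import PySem

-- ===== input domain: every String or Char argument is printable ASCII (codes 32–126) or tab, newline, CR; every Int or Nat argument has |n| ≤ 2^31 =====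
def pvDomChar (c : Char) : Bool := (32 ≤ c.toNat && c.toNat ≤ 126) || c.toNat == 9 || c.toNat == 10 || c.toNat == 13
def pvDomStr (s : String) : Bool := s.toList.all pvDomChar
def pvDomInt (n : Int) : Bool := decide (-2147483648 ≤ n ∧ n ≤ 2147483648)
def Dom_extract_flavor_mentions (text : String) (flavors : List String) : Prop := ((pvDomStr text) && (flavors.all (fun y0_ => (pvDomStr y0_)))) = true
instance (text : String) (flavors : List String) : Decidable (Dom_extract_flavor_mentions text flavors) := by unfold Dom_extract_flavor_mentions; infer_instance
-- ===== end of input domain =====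

-- B replaces A's per-flavor substring scan by a hash-set index: one set of all text substrings whose
-- length is a (distinct) flavor length, then one set lookup per flavor (objective: faster at scale).


-- ===== PORT A =====
-- literal transliteration of A: text is a String so the isinstance guard is always true
def extract_flavor_mentions (text : String) (flavors : List String) : Option (List String) :=
  let text_lower := PySem.Str.lower text
  let found_flavors := flavors.foldl
    (fun acc flavor => if PySem.Str.isIn (PySem.Str.lower flavor) text_lower then acc ++ [flavor] else acc) []
  if found_flavors = [] then none else some found_flavors

-- ===== PORT B =====
-- literal transliteration of Source B; strings handled as char lists via PySem.Chars.
-- `set(len(p) for p in pats)` is PySem.Set.ofList of the mapped lengths (iteration order cannot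
-- affect the resulting set `subs`); `tl[i:i+l]` is PySem.List.slice; `range(len(tl)-l+1)` is pyRange
-- (empty when the bound is ≤ 0, exactly like Python's range).
def extract_flavor_mentions_alt (text : String) (flavors : List String) : Option (List String) :=
  let tl := PySem.Chars.lower text.toList
  let pats := flavors.map (fun f => PySem.Chars.lower f.toList)
  let lengths := PySem.Set.ofList (pats.map (fun p => (p.length : Int)))
  let subs := lengths.foldl
    (fun s l => (PySem.List.pyRange 0 ((tl.length : Int) - l + 1)).foldl
      (fun s i => s.add (PySem.List.slice tl (some i) (some (i + l)))) s)
    (PySem.Set.ofList [])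
  let res := (flavors.zip pats).foldl
    (fun acc fp => if decide (fp.2 ∈ subs) then acc ++ [fp.1] else acc) []
  if res = [] then none else some res

-- ===== PRECONDITION & SPEC =====
def Spec_extract_flavor_mentions (text : String) (flavors : List String) (out : Option (List String)) : Prop := out = extract_flavor_mentions_alt text flavors
instance (text : String) (flavors : List String) (out : Option (List String)) : Decidable (Spec_extract_flavor_mentions text flavors out) := by unfold Spec_extract_flavor_mentions; infer_instance

-- ===== CLAIM (what is proved, stated in full; the proofs are below) =====
def Claim_equal_extract_flavor_mentions : Prop := ∀ (text : String) (flavors : List String), Dom_extract_flavor_mentions text flavors → Spec_extract_flavor_mentions text flavors (extract_flavor_mentions text flavors)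

-- ===== LEMMAS AND PROOFS =====

-- membership after repeatedly adding `g i` to a PySem.Set
theorem pv_add_fold {α β : Type} [BEq α] [LawfulBEq α] (g : β → α) (is : List β)
    (s : PySem.Set α) (q : α) :
    (q ∈ is.foldl (fun s i => PySem.Set.add s (g i)) s) ↔ q ∈ s ∨ ∃ i ∈ is, g i = q := by
  induction is generalizing s with
  | nil => simp
  | cons hd t ih =>
    simp only [List.foldl_cons, ih, PySem.Set.mem_add, List.mem_cons]
    constructor
    · rintro ((hs | hq) | ⟨i, hi, hgi⟩)
      · exact Or.inl hs
      · exact Or.inr ⟨hd, Or.inl rfl, hq.symm⟩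
      · exact Or.inr ⟨i, Or.inr hi, hgi⟩
    · rintro (hs | ⟨i, (hi | hi), hgi⟩)
      · exact Or.inl (Or.inl hs)
      · subst hi; exact Or.inl (Or.inr hgi.symm)
      · exact Or.inr ⟨i, hi, hgi⟩

-- membership in the substring set built over a list of lengths
theorem pv_subs_mem (tl : List Char) (ls : List Int) (s : PySem.Set (List Char)) (q : List Char) :
    (q ∈ ls.foldl
      (fun s l => (PySem.List.pyRange 0 ((tl.length : Int) - l + 1)).foldl
        (fun s i => PySem.Set.add s (PySem.List.slice tl (some i) (some (i + l)))) s) s) ↔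
    q ∈ s ∨ ∃ l ∈ ls, ∃ i ∈ PySem.List.pyRange 0 ((tl.length : Int) - l + 1),
      PySem.List.slice tl (some i) (some (i + l)) = q := by
  induction ls generalizing s with
  | nil => simp
  | cons hd t ih =>
    simp only [List.foldl_cons, ih, pv_add_fold, List.mem_cons]
    constructor
    · rintro ((hs | ⟨i, hi, hsl⟩) | ⟨l, hl, hrest⟩)
      · exact Or.inl hs
      · exact Or.inr ⟨hd, Or.inl rfl, i, hi, hsl⟩
      · exact Or.inr ⟨l, Or.inr hl, hrest⟩
    · rintro (hs | ⟨l, (hl | hl), i, hi, hsl⟩)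
      · exact Or.inl (Or.inl hs)
      · subst hl; exact Or.inl (Or.inr ⟨i, hi, hsl⟩)
      · exact Or.inr ⟨l, hl, i, hi, hsl⟩

-- a nonnegatively-bounded slice is an infix of the list
theorem pv_slice_infix (tl : List Char) (i l : Int) (hi : 0 ≤ i) (hl : 0 ≤ l) :
    PySem.List.slice tl (some i) (some (i + l)) <:+: tl := by
  rw [PySem.List.slice_toNat (xs := tl) (a := i) (b := i + l) hi (by omega)]
  exact List.infix_iff_prefix_suffix.2 ⟨tl.drop i.toNat, List.take_prefix _ _, List.drop_suffix _ _⟩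

-- a pattern whose length is one of the indexed lengths lies in the substring set iff it occurs in tl
theorem pv_subs_iff_isIn (tl p : List Char) (ls : List Int)
    (hnn : ∀ l ∈ ls, 0 ≤ l) (hlen : (p.length : Int) ∈ ls) :
    (∃ l ∈ ls, ∃ i ∈ PySem.List.pyRange 0 ((tl.length : Int) - l + 1),
      PySem.List.slice tl (some i) (some (i + l)) = p) ↔ PySem.Chars.isIn p tl := by
  rw [PySem.Chars.isIn_iff_infix]
  constructor
  · rintro ⟨l, hl, i, hi, hsl⟩
    rw [PySem.List.mem_pyRange_one] at hi
    rw [← hsl]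
    exact pv_slice_infix tl i l hi.1 (hnn l hl)
  · rintro ⟨u, v, rfl⟩
    refine ⟨(p.length : Int), hlen, (u.length : Int), ?_, ?_⟩
    · rw [PySem.List.mem_pyRange_one]
      constructor
      · omega
      · simp only [List.length_append]
        push_cast
        omega
    · rw [PySem.List.slice_natCast_add (u ++ p ++ v) u.length p.length]
      rw [List.append_assoc, List.drop_left, List.take_left]

-- ===== VERDICT (by name: the statement is the Claim_ definition above) =====
theorem extract_flavor_mentions_spec : Claim_equal_extract_flavor_mentions := by
  intro text flavors _
  unfold Spec_extract_flavor_mentions extract_flavor_mentions extract_flavor_mentions_alt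
  simp only []
  set tl := PySem.Chars.lower text.toList with htl
  set pats := flavors.map (fun f => PySem.Chars.lower f.toList) with hpats
  set lengths := PySem.Set.ofList (pats.map (fun p => (p.length : Int))) with hlengths
  set subs := lengths.foldl
    (fun s l => (PySem.List.pyRange 0 ((tl.length : Int) - l + 1)).foldl
      (fun s i => PySem.Set.add s (PySem.List.slice tl (some i) (some (i + l)))) s)
    (PySem.Set.ofList []) with hsubs
  -- membership in `subs` for an indexed pattern is exactly substring occurrence
  have hnn : ∀ l ∈ (lengths : List Int), 0 ≤ l := by
    intro l hl
    rw [hlengths] at hl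
    have := (PySem.Set.mem_ofList _ _).1 hl
    obtain ⟨p, _, rfl⟩ := List.mem_map.1 this
    positivity
  have hmem : ∀ p : List Char, p ∈ pats → ((p ∈ subs) ↔ PySem.Chars.isIn p tl) := by
    intro p hp
    have hlen : (p.length : Int) ∈ (lengths : List Int) := by
      rw [hlengths]
      exact (PySem.Set.mem_ofList _ _).2 (List.mem_map.2 ⟨p, hp, rfl⟩)
    rw [hsubs, pv_subs_mem]
    simp only [PySem.Set.mem_ofList, List.not_mem_nil, false_or]
    exact pv_subs_iff_isIn tl p lengths hnn hlen
  -- both result lists are the same filter of `flavors`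
  have hA : flavors.foldl
      (fun acc flavor => if PySem.Str.isIn (PySem.Str.lower flavor) (PySem.Str.lower text)
        then acc ++ [flavor] else acc) [] =
      flavors.filter (fun f => PySem.Str.isIn (PySem.Str.lower f) (PySem.Str.lower text)) := by
    simpa using PySem.List.foldl_append_if
      (p := fun f => PySem.Str.isIn (PySem.Str.lower f) (PySem.Str.lower text))
      (f := (id : String → String)) flavors []
  have hzip : flavors.zip pats = flavors.map (fun f => (f, PySem.Chars.lower f.toList)) := by
    rw [hpats]
    simpa using (List.zip_map' (f := (id : String → String))
      (g := fun f => PySem.Chars.lower f.toList) (l := flavors))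
  have hB : (flavors.zip pats).foldl
      (fun acc fp => if decide (fp.2 ∈ subs) then acc ++ [fp.1] else acc) [] =
      flavors.filter (fun f => PySem.Str.isIn (PySem.Str.lower f) (PySem.Str.lower text)) := by
    rw [hzip, List.foldl_map]
    have := PySem.List.foldl_append_if
      (p := fun f => decide ((PySem.Chars.lower f.toList) ∈ subs))
      (f := (id : String → String)) flavors []
    simp only [List.nil_append, List.map_id, id] at this
    rw [this]
    apply List.filter_congr
    intro f hf
    have hp : PySem.Chars.lower f.toList ∈ pats := by
      rw [hpats]; exact List.mem_map.2 ⟨f, hf, rfl⟩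
    have hstr : PySem.Str.isIn (PySem.Str.lower f) (PySem.Str.lower text) =
        PySem.Chars.isIn (PySem.Chars.lower f.toList) tl := by
      simp [PySem.Str.isIn_eq, PySem.Str.toList_lower, htl]
    rw [hstr, Bool.eq_iff_iff]
    simp [hmem _ hp]
  rw [hA, hB]
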